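-- pv_equiv track=rewrite | github.com/btenner84/Price-Transparency | price-finder/src/validators/file_validator.py | _headers_indicate_price_file
-- ===== SOURCE A (Python) =====
-- from typing import Tuple, List, Dict, Any, Optional, Set
--
-- def _headers_indicate_price_file(headers: List[str]) -> bool:
--     """Check if headers indicate a price transparency file.
--
--     Args:
--         headers: List of header strings
--
--     Returns:
--         True if headers indicate a price file, False otherwise
--     """
--     if not headers:
--         return False
--
--     # Convert headers to lowercase for case-insensitive matching
--     headers_lower = [str(h).lower() for h in headers]
--
--     # Check for header patterns that MUST be present in price transparency files
--     required_column_types = [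
--         # Price-related headers
--         ['price', 'charge', 'rate', 'fee', 'cost', 'amount', 'dollar', 'payment'],
--
--         # Code-related headers (at least one type of code should be present)
--         ['cpt', 'hcpcs', 'drg', 'ms-drg', 'code', 'rev', 'procedure', 'service', 'ndc']
--     ]
--
--     # Count how many of the required column types are present
--     present_types = 0
--     for column_type in required_column_types:
--         if any(any(keyword in header for keyword in column_type) for header in headers_lower):
--             present_types += 1
--
--     # For a valid price file, we need at least one price-related column AND
--     # either a code or service-related column
--     sufficient_columns = present_types >= 2
--
--     # Alternative check: look for very specific price transparency patterns
--     price_transparency_patterns = [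
--         # Standard price transparency columns
--         'standard charge', 'list price', 'cash price', 'discounted cash',
--         'negotiated rate', 'payer-specific', 'min price', 'max price',
--         'gross charge', 'chargemaster', 'self-pay'
--     ]
--
--     has_transparency_pattern = any(
--         any(pattern in header for pattern in price_transparency_patterns)
--         for header in headers_lower
--     )
--
--     # Also check if the headers include the string 'price'
--     has_price = any('price' in header for header in headers_lower)
--
--     # Check for common hospital data elements (useful when combined with price indicators)
--     hospital_indicators = ['hospital', 'facility', 'provider', 'location', 'department']
--     has_hospital_indicator = any(
--         any(indicator in header for indicator in hospital_indicators)
--         for header in headers_lower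
--     )
--
--     # Return true if the file has sufficient columns OR specific price transparency patterns
--     # OR has both price column and hospital indicator
--     return sufficient_columns or has_transparency_pattern or (has_price and has_hospital_indicator)
-- ===== SOURCE B (Python) =====
-- # Category bits: 1=price-related, 2=code-related, 4=transparency pattern,
-- # 8=the literal word 'price', 16=hospital indicator.  'price' carries 1|8.
-- _KEYWORD_TABLE = (
--     ('price', 9), ('charge', 1), ('rate', 1), ('fee', 1), ('cost', 1),
--     ('amount', 1), ('dollar', 1), ('payment', 1),
--     ('cpt', 2), ('hcpcs', 2), ('drg', 2), ('ms-drg', 2), ('code', 2), ('rev', 2),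
--     ('procedure', 2), ('service', 2), ('ndc', 2),
--     ('standard charge', 4), ('list price', 4), ('cash price', 4),
--     ('discounted cash', 4), ('negotiated rate', 4), ('payer-specific', 4),
--     ('min price', 4), ('max price', 4), ('gross charge', 4),
--     ('chargemaster', 4), ('self-pay', 4),
--     ('hospital', 16), ('facility', 16), ('provider', 16),
--     ('location', 16), ('department', 16),
-- )
--
--
-- def _scan_header(mask, hl):
--     """Walk each position of hl once, OR in the category bits of every
--     table keyword that starts at that position."""
--     for i in range(len(hl)):
--         for kw, bits in _KEYWORD_TABLE:
--             if hl.startswith(kw, i):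
--                 mask |= bits
--     return mask
--
--
-- def _headers_indicate_price_file(headers):
--     """Table-driven multi-pattern position scan: one flat keyword->category-bits
--     table; accumulate one bitmask over all headers, then decide from the mask."""
--     if not headers:
--         return False
--     mask = 0
--     for h in headers:
--         mask = _scan_header(mask, str(h).lower())
--     return ((mask & 1) != 0 and (mask & 2) != 0) or (mask & 4) != 0 \
--         or ((mask & 8) != 0 and (mask & 16) != 0)
-- ===== Notes on version B (the rewrite author's own statement) =====
-- stated objective: alternative
-- what changed: Replaces A's staged keyword-group scans built on Python's 'in' substring test with a table-driven multi-pattern matcher: one flat keyword-to-category-bits table, a single startswith scan over every position of every lowercased header accumulating one bitmask, and a final decision read off the mask's bits.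
import Mathlib
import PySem

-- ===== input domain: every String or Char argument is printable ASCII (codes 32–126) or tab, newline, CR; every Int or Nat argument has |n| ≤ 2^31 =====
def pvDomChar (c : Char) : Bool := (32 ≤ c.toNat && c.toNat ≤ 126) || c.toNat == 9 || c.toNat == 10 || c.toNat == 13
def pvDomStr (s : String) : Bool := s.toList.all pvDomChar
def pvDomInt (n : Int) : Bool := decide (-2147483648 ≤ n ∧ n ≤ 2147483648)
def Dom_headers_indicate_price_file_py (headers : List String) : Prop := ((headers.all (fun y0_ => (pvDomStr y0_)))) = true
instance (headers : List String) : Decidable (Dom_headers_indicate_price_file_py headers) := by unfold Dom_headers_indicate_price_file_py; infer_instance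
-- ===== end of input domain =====

set_option maxHeartbeats 1000000


-- B replaces A's staged keyword-group scans (built on the `in` substring test) with a
-- table-driven multi-pattern position scanner accumulating one category bitmask;
-- objective: alternative (same asymptotic cost).

-- ===== PORT A =====
def pvPriceKw : List String := ["price", "charge", "rate", "fee", "cost", "amount", "dollar", "payment"]
def pvCodeKw : List String := ["cpt", "hcpcs", "drg", "ms-drg", "code", "rev", "procedure", "service", "ndc"]
def pvTransPat : List String := ["standard charge", "list price", "cash price", "discounted cash",
  "negotiated rate", "payer-specific", "min price", "max price", "gross charge", "chargemaster", "self-pay"]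
def pvHospInd : List String := ["hospital", "facility", "provider", "location", "department"]

def headers_indicate_price_file_py (headers : List String) : Bool :=
  if headers = [] then false else
  let headersLower := headers.map (fun h => PySem.Str.lower h)
  let requiredColumnTypes := [pvPriceKw, pvCodeKw]
  let presentTypes : Nat := requiredColumnTypes.foldl (fun acc columnType =>
    if headersLower.any (fun header => columnType.any (fun kw => PySem.Str.isIn kw header))
    then acc + 1 else acc) 0
  let sufficientColumns : Bool := decide (2 ≤ presentTypes)
  let hasTransparencyPattern : Bool :=
    headersLower.any (fun header => pvTransPat.any (fun pat => PySem.Str.isIn pat header))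
  let hasPrice : Bool := headersLower.any (fun header => PySem.Str.isIn "price" header)
  let hasHospitalIndicator : Bool :=
    headersLower.any (fun header => pvHospInd.any (fun ind => PySem.Str.isIn ind header))
  sufficientColumns || hasTransparencyPattern || (hasPrice && hasHospitalIndicator)

-- ===== PORT B =====
-- Category bits: 1 price-related, 2 code-related, 4 transparency pattern,
-- 8 the literal word 'price', 16 hospital indicator ('price' carries 1|8 = 9).
def pvKwTable : List (List Char × Nat) := [
  ("price".toList, 9),
  ("charge".toList, 1),
  ("rate".toList, 1),
  ("fee".toList, 1),
  ("cost".toList, 1),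
  ("amount".toList, 1),
  ("dollar".toList, 1),
  ("payment".toList, 1),
  ("cpt".toList, 2),
  ("hcpcs".toList, 2),
  ("drg".toList, 2),
  ("ms-drg".toList, 2),
  ("code".toList, 2),
  ("rev".toList, 2),
  ("procedure".toList, 2),
  ("service".toList, 2),
  ("ndc".toList, 2),
  ("standard charge".toList, 4),
  ("list price".toList, 4),
  ("cash price".toList, 4),
  ("discounted cash".toList, 4),
  ("negotiated rate".toList, 4),
  ("payer-specific".toList, 4),
  ("min price".toList, 4),
  ("max price".toList, 4),
  ("gross charge".toList, 4),
  ("chargemaster".toList, 4),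
  ("self-pay".toList, 4),
  ("hospital".toList, 16),
  ("facility".toList, 16),
  ("provider".toList, 16),
  ("location".toList, 16),
  ("department".toList, 16)]

-- Source B's _scan_header: `hl.startswith(kw, i)` (0 ≤ i < len(hl)) is ported exactly as
-- kw.isPrefixOf (hl.drop i); `range(len(hl))` is List.range (exact: the length is a Nat);
-- the mask is a nonnegative Python int, ported as Nat with the same bitwise ops.
def pvScanHeader (mask : Nat) (hl : List Char) : Nat :=
  (List.range hl.length).foldl (fun mask i =>
    pvKwTable.foldl (fun mask kb =>
      if kb.1.isPrefixOf (hl.drop i) then mask ||| kb.2 else mask) mask) mask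

def headers_indicate_price_file_py_alt (headers : List String) : Bool :=
  if headers = [] then false else
  let mask : Nat := headers.foldl (fun mask h => pvScanHeader mask (PySem.Str.lower h).toList) 0
  (decide ((mask &&& 1) ≠ 0) && decide ((mask &&& 2) ≠ 0)) ||
    decide ((mask &&& 4) ≠ 0) ||
    (decide ((mask &&& 8) ≠ 0) && decide ((mask &&& 16) ≠ 0))

-- ===== PRECONDITION & SPEC =====
def Spec_headers_indicate_price_file_py (headers : List String) (out : Bool) : Prop := out = headers_indicate_price_file_py_alt headers
instance (headers : List String) (out : Bool) : Decidable (Spec_headers_indicate_price_file_py headers out) := by unfold Spec_headers_indicate_price_file_py; infer_instance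

-- ===== CLAIM =====
def Claim_equal_headers_indicate_price_file_py : Prop := ∀ (headers : List String), Dom_headers_indicate_price_file_py headers → Spec_headers_indicate_price_file_py headers (headers_indicate_price_file_py headers)

-- ===== LEMMAS AND PROOFS =====

-- A fold whose step's effect on bit b is "OR in q x" computes, on bit b, the OR of q over the list.
lemma testBit_foldl {α : Type} (step : Nat → α → Nat) (q : α → Bool) (b : Nat)
    (hstep : ∀ m x, (step m x).testBit b = (m.testBit b || q x)) :
    ∀ (l : List α) (m : Nat), (l.foldl step m).testBit b = (m.testBit b || l.any q) := by
  intro l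
  induction l with
  | nil => simp
  | cons x t ih => intro m; simp [List.foldl_cons, ih, hstep, Bool.or_assoc]

lemma any_or {α : Type} (l : List α) (p q : α → Bool) :
    l.any (fun x => p x || q x) = (l.any p || l.any q) := by
  induction l with
  | nil => simp
  | cons x t ih =>
    simp only [List.any_cons, ih]
    cases p x <;> cases q x <;> simp

-- the five mask tests, one bit each
lemma decide_and_1 (m : Nat) : decide ((m &&& 1) ≠ 0) = m.testBit 0 := by
  rw [show (1:Nat) = 2^0 from rfl, Nat.and_two_pow]; cases h : m.testBit 0 <;> simp
lemma decide_and_2 (m : Nat) : decide ((m &&& 2) ≠ 0) = m.testBit 1 := by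
  rw [show (2:Nat) = 2^1 from rfl, Nat.and_two_pow]; cases h : m.testBit 1 <;> simp
lemma decide_and_4 (m : Nat) : decide ((m &&& 4) ≠ 0) = m.testBit 2 := by
  rw [show (4:Nat) = 2^2 from rfl, Nat.and_two_pow]; cases h : m.testBit 2 <;> simp
lemma decide_and_8 (m : Nat) : decide ((m &&& 8) ≠ 0) = m.testBit 3 := by
  rw [show (8:Nat) = 2^3 from rfl, Nat.and_two_pow]; cases h : m.testBit 3 <;> simp
lemma decide_and_16 (m : Nat) : decide ((m &&& 16) ≠ 0) = m.testBit 4 := by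
  rw [show (16:Nat) = 2^4 from rfl, Nat.and_two_pow]; cases h : m.testBit 4 <;> simp

-- a nonempty pattern starts at some position of s  ⟺  it is a substring of s
lemma range_any_prefix (c : Char) (rest s : List Char) :
    (List.range s.length).any (fun i => (c :: rest).isPrefixOf (s.drop i))
      = PySem.Chars.isIn (c :: rest) s := by
  cases hc : PySem.Chars.isIn (c :: rest) s
  · rw [List.any_eq_false]
    intro i _
    simp only [Bool.not_eq_true]
    by_contra hp
    have hinf := (PySem.Chars.exists_prefix_drop_iff_isIn (c :: rest) s).mp
      ⟨i, List.isPrefixOf_iff_prefix.mp (by simpa using hp)⟩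
    simp [hc] at hinf
  · rw [List.any_eq_true]
    obtain ⟨j, hj⟩ := (PySem.Chars.exists_prefix_drop_iff_isIn (c :: rest) s).mpr hc
    have hlen := hj.length_le
    simp only [List.length_cons, List.length_drop] at hlen
    exact ⟨j, List.mem_range.mpr (by omega), List.isPrefixOf_iff_prefix.mpr hj⟩

-- bit b of one header's scan
lemma scanHeader_testBit (b m : Nat) (hl : List Char) :
    (pvScanHeader m hl).testBit b
      = (m.testBit b || (List.range hl.length).any (fun i =>
          pvKwTable.any (fun kb => kb.1.isPrefixOf (hl.drop i) && kb.2.testBit b))) := by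
  unfold pvScanHeader
  refine testBit_foldl _
    (fun i => pvKwTable.any (fun kb => kb.1.isPrefixOf (hl.drop i) && kb.2.testBit b))
    b (fun m' i => ?_) _ m
  refine testBit_foldl _
    (fun (kb : List Char × Nat) => kb.1.isPrefixOf (hl.drop i) && kb.2.testBit b)
    b (fun m'' kb => ?_) _ m'
  split_ifs with hpre <;> simp [hpre]

-- bit b of the accumulated mask
lemma maskBit (headers : List String) (b : Nat) :
    (headers.foldl (fun mask h => pvScanHeader mask (PySem.Str.lower h).toList) 0).testBit b
      = headers.any (fun h =>
          (List.range (PySem.Str.lower h).toList.length).any (fun i =>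
            pvKwTable.any (fun kb =>
              kb.1.isPrefixOf ((PySem.Str.lower h).toList.drop i) && kb.2.testBit b))) := by
  have h1 := testBit_foldl
    (fun mask h => pvScanHeader mask (PySem.Str.lower h).toList)
    (fun h => (List.range (PySem.Str.lower h).toList.length).any (fun i =>
      pvKwTable.any (fun kb =>
        kb.1.isPrefixOf ((PySem.Str.lower h).toList.drop i) && kb.2.testBit b)))
    b (fun m h => scanHeader_testBit b m (PySem.Str.lower h).toList) headers 0
  simpa using h1

-- per bit, the positional table scan is the corresponding keyword-group substring test
lemma tableAny_bit0 (s : List Char) :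
    (List.range s.length).any (fun i =>
      pvKwTable.any (fun kb => kb.1.isPrefixOf (s.drop i) && kb.2.testBit 0))
    = pvPriceKw.any (fun kw => PySem.Chars.isIn kw.toList s) := by
  simp [pvKwTable, pvPriceKw, Nat.testBit_zero, any_or, range_any_prefix]

lemma tableAny_bit1 (s : List Char) :
    (List.range s.length).any (fun i =>
      pvKwTable.any (fun kb => kb.1.isPrefixOf (s.drop i) && kb.2.testBit 1))
    = pvCodeKw.any (fun kw => PySem.Chars.isIn kw.toList s) := by
  simp [pvKwTable, pvCodeKw, Nat.testBit_succ, Nat.testBit_zero, any_or,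
    range_any_prefix]

lemma tableAny_bit2 (s : List Char) :
    (List.range s.length).any (fun i =>
      pvKwTable.any (fun kb => kb.1.isPrefixOf (s.drop i) && kb.2.testBit 2))
    = pvTransPat.any (fun kw => PySem.Chars.isIn kw.toList s) := by
  simp [pvKwTable, pvTransPat, Nat.testBit_succ, Nat.testBit_zero, any_or,
    range_any_prefix]

lemma tableAny_bit3 (s : List Char) :
    (List.range s.length).any (fun i =>
      pvKwTable.any (fun kb => kb.1.isPrefixOf (s.drop i) && kb.2.testBit 3))
    = PySem.Chars.isIn "price".toList s := by
  simp [pvKwTable, Nat.testBit_succ, Nat.testBit_zero, range_any_prefix]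

lemma tableAny_bit4 (s : List Char) :
    (List.range s.length).any (fun i =>
      pvKwTable.any (fun kb => kb.1.isPrefixOf (s.drop i) && kb.2.testBit 4))
    = pvHospInd.any (fun kw => PySem.Chars.isIn kw.toList s) := by
  simp [pvKwTable, pvHospInd, Nat.testBit_succ, Nat.testBit_zero, any_or,
    range_any_prefix]

lemma decide_two_le_count (a b : Bool) :
    (decide (2 ≤ (if b then (if a then 1 else 0) + 1 else (if a then 1 else 0) : Nat)))
      = (a && b) := by
  cases a <;> cases b <;> decide

-- ===== VERDICT =====
theorem headers_indicate_price_file_py_spec : Claim_equal_headers_indicate_price_file_py := by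
  intro headers _
  unfold Spec_headers_indicate_price_file_py
  by_cases h : headers = []
  · simp [headers_indicate_price_file_py, headers_indicate_price_file_py_alt, h]
  · rw [headers_indicate_price_file_py, headers_indicate_price_file_py_alt, if_neg h, if_neg h]
    simp only [decide_and_1, decide_and_2, decide_and_4, decide_and_8, decide_and_16,
      maskBit, tableAny_bit0, tableAny_bit1, tableAny_bit2, tableAny_bit3, tableAny_bit4]
    simp only [List.foldl_cons, List.foldl_nil, Nat.zero_add, decide_two_le_count,
      List.any_map, Function.comp_def]
    simp [PySem.Str.isIn_eq]
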